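-- pv_equiv track=rewrite | github.com/SebLundquist/AilaDemo | aila.py | remove_system_messages
-- ===== SOURCE A (Python) =====
-- def remove_system_messages(context, num_to_remove=3):
--     count_removed = 0
--     first_hit_skipped = False
--
--     # Create a new list to store the messages we want to keep
--     new_context = []
--
--     for message in context:
--         if message['role'] == 'system':
--             if not first_hit_skipped:
--                 # Skip the first 'system' message
--                 first_hit_skipped = True
--                 new_context.append(message)
--                 continue
--             if count_removed < num_to_remove:
--                 # Remove this 'system' message
--                 count_removed += 1
--                 continue
--         # Add the message to the new context
--         new_context.append(message)
--
--     return new_context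
-- ===== SOURCE B (Python) =====
-- def remove_system_messages(context, num_to_remove=3):
--     sys_idx = [i for i, m in enumerate(context) if m['role'] == 'system']
--     drop = {i for rank, i in enumerate(sys_idx) if rank >= 1 and rank - 1 < num_to_remove}
--     return [m for i, m in enumerate(context) if i not in drop]
-- ===== Notes on version B (the rewrite author's own statement) =====
-- stated objective: alternative
-- what changed: B is a two-pass index-set plan instead of A's one-pass flag/counter state machine: it first collects the indices of system messages, builds the set of indices whose system-rank is 1..num_to_remove, then rebuilds the list by filtering out exactly those indices.
-- outside the precondition, e.g. on remove_system_messages([{'content': 'x'}], 3): A raises KeyError, B raises KeyError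
import Mathlib
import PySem

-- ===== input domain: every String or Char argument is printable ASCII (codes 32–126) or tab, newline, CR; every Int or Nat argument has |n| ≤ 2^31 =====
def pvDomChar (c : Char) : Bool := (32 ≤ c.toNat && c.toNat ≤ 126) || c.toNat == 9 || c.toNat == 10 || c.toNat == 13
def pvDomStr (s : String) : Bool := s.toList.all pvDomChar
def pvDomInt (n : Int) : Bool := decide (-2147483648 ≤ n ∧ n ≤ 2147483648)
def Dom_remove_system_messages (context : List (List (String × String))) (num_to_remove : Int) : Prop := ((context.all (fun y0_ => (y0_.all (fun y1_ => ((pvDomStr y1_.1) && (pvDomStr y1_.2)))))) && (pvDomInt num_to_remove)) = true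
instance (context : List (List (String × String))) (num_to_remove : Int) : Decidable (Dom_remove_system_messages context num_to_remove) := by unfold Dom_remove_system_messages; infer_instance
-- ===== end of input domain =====

-- B replaces A's one-pass flag/counter state machine by an index-based two-pass plan: collect the indices of system messages, form the set of indices ranked 1..num_to_remove, and rebuild by filtering out those indices (same cost, different decomposition).


-- ===== PORT A =====
-- m['role'] : first-match lookup in the association list; Python raises KeyError when
-- the key is absent — exactly those inputs are excluded by Pre_, so getD "" is never hit there.
def pvRole (m : List (String × String)) : String :=
  ((m.find? (fun p => p.1 == "role")).map Prod.snd).getD ""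

-- A's for-loop, step for step: state = (count_removed, first_hit_skipped, new_context).
def pvGoA (num : Int) : List (List (String × String)) → Int → Bool → List (List (String × String)) → List (List (String × String))
  | [], _, _, acc => acc
  | m :: rest, cnt, first, acc =>
    if pvRole m == "system" then
      if !first then pvGoA num rest cnt true (acc ++ [m])
      else if cnt < num then pvGoA num rest (cnt + 1) first acc
      else pvGoA num rest cnt first (acc ++ [m])
    else pvGoA num rest cnt first (acc ++ [m])

def remove_system_messages (context : List (List (String × String))) (num_to_remove : Int) : List (List (String × String)) :=
  pvGoA num_to_remove context 0 false []

-- ===== PORT B =====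
-- Source B, line for line: sys_idx = indices of system messages; drop = set of those whose
-- rank among system messages is 1..num_to_remove; keep every index not in drop.
def remove_system_messages_alt (context : List (List (String × String))) (num_to_remove : Int) : List (List (String × String)) :=
  let sys_idx : List Int := ((PySem.List.enumerate context).filter (fun p => pvRole p.2 == "system")).map Prod.fst
  let drop : PySem.Set Int := PySem.Set.ofList (((PySem.List.enumerate sys_idx).filter (fun p => decide (1 ≤ p.1 ∧ p.1 - 1 < num_to_remove))).map Prod.snd)
  ((PySem.List.enumerate context).filter (fun p => !(PySem.Set.contains drop p.1))).map Prod.snd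

-- ===== PRECONDITION & SPEC =====
-- Pre_ excludes exactly the inputs where Python raises KeyError: a message without a 'role' key.
def Pre_remove_system_messages (context : List (List (String × String))) (_num_to_remove : Int) : Prop :=
  (context.all (fun m => m.any (fun p => p.1 == "role"))) = true
instance (context : List (List (String × String))) (num_to_remove : Int) : Decidable (Pre_remove_system_messages context num_to_remove) := by unfold Pre_remove_system_messages; infer_instance

def pvWitness_remove_system_messages : (List (List (String × String))) × Int :=
  ([[("role", "system"), ("content", "hi")], [("role", "user")], [("role", "system")]], 1)

def Spec_remove_system_messages (context : List (List (String × String))) (num_to_remove : Int) (out : List (List (String × String))) : Prop := out = remove_system_messages_alt context num_to_remove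
instance (context : List (List (String × String))) (num_to_remove : Int) (out : List (List (String × String))) : Decidable (Spec_remove_system_messages context num_to_remove out) := by unfold Spec_remove_system_messages; infer_instance

-- ===== CLAIM (what is proved, stated in full; the proofs are below) =====
def Claim_equal_remove_system_messages : Prop := ∀ (context : List (List (String × String))) (num_to_remove : Int), Dom_remove_system_messages context num_to_remove → Pre_remove_system_messages context num_to_remove → Spec_remove_system_messages context num_to_remove (remove_system_messages context num_to_remove)

-- ===== LEMMAS AND PROOFS =====

-- Common yardstick both ports are reduced to: keep everything through the first system
-- message, then drop system messages from the suffix with a countdown.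
def pvDropLoop (k : Int) : List (List (String × String)) → List (List (String × String))
  | [] => []
  | m :: rest =>
    if k > 0 && pvRole m == "system" then pvDropLoop (k - 1) rest
    else m :: pvDropLoop k rest

def pvSplit (context : List (List (String × String))) (num : Int) : List (List (String × String)) :=
  match context.findIdx? (fun m => pvRole m == "system") with
  | none => context
  | some i => context.take (i + 1) ++ pvDropLoop num (context.drop (i + 1))

-- Proof-layer names for the three stages of B.
def pvSysL (l : List (List (String × String))) : List Int :=
  ((PySem.List.enumerate l).filter (fun p => pvRole p.2 == "system")).map Prod.fst

def pvDL (num : Int) (S : List Int) : List Int :=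
  ((PySem.List.enumerate S).filter (fun p => decide (1 ≤ p.1 ∧ p.1 - 1 < num))).map Prod.snd

def pvTK (num : Int) (S : List Int) : List Int :=
  ((PySem.List.enumerate S).filter (fun p => decide (p.1 < num))).map Prod.snd

def pvOut (l : List (List (String × String))) (D : List Int) : List (List (String × String)) :=
  ((PySem.List.enumerate l).filter (fun p => !(PySem.Set.contains (PySem.Set.ofList D) p.1))).map Prod.snd

theorem pvAlt_eq (l : List (List (String × String))) (num : Int) :
    remove_system_messages_alt l num = pvOut l (pvDL num (pvSysL l)) := rfl

-- enumerate bookkeeping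
theorem pvEnumShift' {α : Type} (xs : List α) (s : Int) :
    ∀ t : Int, PySem.List.enumerate xs (t + s) = (PySem.List.enumerate xs t).map (fun p => (p.1 + s, p.2)) := by
  induction xs with
  | nil => intro t; simp [PySem.List.enumerate_nil]
  | cons x xs ih =>
    intro t
    rw [PySem.List.enumerate_cons, PySem.List.enumerate_cons, List.map_cons]
    rw [show t + s + 1 = (t + 1) + s by ring, ih (t + 1)]

theorem pvEnumShift {α : Type} (xs : List α) :
    PySem.List.enumerate xs 1 = (PySem.List.enumerate xs 0).map (fun p => (p.1 + 1, p.2)) := by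
  have := pvEnumShift' xs 1 0
  simpa using this

theorem pvEnumMap {α β : Type} (f : α → β) (xs : List α) :
    ∀ s : Int, PySem.List.enumerate (xs.map f) s = (PySem.List.enumerate xs s).map (fun p => (p.1, f p.2)) := by
  induction xs with
  | nil => intro s; simp [PySem.List.enumerate_nil]
  | cons x xs ih => intro s; rw [List.map_cons, PySem.List.enumerate_cons, PySem.List.enumerate_cons, List.map_cons, ih (s + 1)]

theorem pvEnumNonneg {α : Type} (xs : List α) (p : Int × α) (h : p ∈ PySem.List.enumerate xs 0) : 0 ≤ p.1 := by
  rw [PySem.List.mem_enumerate_iff] at h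
  obtain ⟨k, hk, rfl⟩ := h
  simp

theorem pvContainsOfList (L : List Int) (x : Int) :
    PySem.Set.contains (PySem.Set.ofList L) x = decide (x ∈ L) := by
  simp [PySem.Set.contains, PySem.Set.mem_ofList]

theorem pvMemMapSndFilter {α : Type} (c : Int × α → Bool) (S : List α) (x : α)
    (h : x ∈ ((PySem.List.enumerate S).filter c).map Prod.snd) : x ∈ S := by
  obtain ⟨p, hp, rfl⟩ := List.mem_map.1 h
  have hp' := List.mem_of_mem_filter hp
  rw [PySem.List.mem_enumerate_iff] at hp'
  obtain ⟨k, hk, rfl⟩ := hp'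
  exact List.getElem_mem hk

theorem pvSysL_nonneg (l : List (List (String × String))) (x : Int) (h : x ∈ pvSysL l) : 0 ≤ x := by
  obtain ⟨p, hp, rfl⟩ := List.mem_map.1 h
  exact pvEnumNonneg _ _ (List.mem_of_mem_filter hp)

theorem pvTK_mem (num : Int) (S : List Int) (x : Int) (h : x ∈ pvTK num S) : x ∈ S :=
  pvMemMapSndFilter _ _ _ h

theorem pvDL_mem (num : Int) (S : List Int) (x : Int) (h : x ∈ pvDL num S) : x ∈ S :=
  pvMemMapSndFilter _ _ _ h

-- shapes of the stages under cons / map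
theorem pvSysL_cons_not (m : List (String × String)) (r : List (List (String × String)))
    (h : (pvRole m == "system") = false) : pvSysL (m :: r) = (pvSysL r).map (· + 1) := by
  unfold pvSysL
  rw [PySem.List.enumerate_cons]
  simp only [List.filter_cons, h, Bool.false_eq_true, if_false, zero_add]
  rw [pvEnumShift, List.filter_map]
  simp [List.map_map, Function.comp_def]

theorem pvSysL_cons_sys (m : List (String × String)) (r : List (List (String × String)))
    (h : (pvRole m == "system") = true) : pvSysL (m :: r) = 0 :: (pvSysL r).map (· + 1) := by
  unfold pvSysL
  rw [PySem.List.enumerate_cons]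
  simp only [List.filter_cons, h, if_true, zero_add]
  rw [pvEnumShift, List.filter_map]
  simp [List.map_map, Function.comp_def]

theorem pvDL_map (num : Int) (f : Int → Int) (S : List Int) :
    pvDL num (S.map f) = (pvDL num S).map f := by
  unfold pvDL
  rw [pvEnumMap f S 0, List.filter_map]
  simp [List.map_map, Function.comp_def]

theorem pvTK_map (num : Int) (f : Int → Int) (S : List Int) :
    pvTK num (S.map f) = (pvTK num S).map f := by
  unfold pvTK
  rw [pvEnumMap f S 0, List.filter_map]
  simp [List.map_map, Function.comp_def]

theorem pvDL_cons_zero (num : Int) (S : List Int) : pvDL num (0 :: S) = pvTK num S := by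
  unfold pvDL pvTK
  rw [PySem.List.enumerate_cons]
  simp only [List.filter_cons]
  rw [if_neg (by simp), zero_add, pvEnumShift, List.filter_map]
  simp only [Function.comp_def]
  rw [List.filter_congr (p := fun p : Int × Int => decide (1 ≤ p.1 + 1 ∧ p.1 + 1 - 1 < num))
      (q := fun p : Int × Int => decide (p.1 < num))
      (fun p hp => by
        have := pvEnumNonneg S p hp
        simp only [decide_eq_decide]; omega)]
  simp [List.map_map, Function.comp_def]

theorem pvTK_cons_pos (num : Int) (a : Int) (S : List Int) (h : 0 < num) :
    pvTK num (a :: S) = a :: pvTK (num - 1) S := by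
  unfold pvTK
  rw [PySem.List.enumerate_cons]
  simp only [List.filter_cons]
  rw [if_pos (by simpa using h), zero_add, pvEnumShift, List.filter_map]
  simp only [Function.comp_def]
  rw [List.filter_congr (p := fun p : Int × Int => decide (p.1 + 1 < num))
      (q := fun p : Int × Int => decide (p.1 < num - 1))
      (fun p _ => by simp only [decide_eq_decide]; omega)]
  simp [List.map_map, Function.comp_def]

theorem pvTK_nonpos (num : Int) (S : List Int) (h : num ≤ 0) : pvTK num S = [] := by
  unfold pvTK
  rw [List.filter_congr (q := fun _ : Int × Int => false)
      (fun p hp => by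
        have := pvEnumNonneg S p hp
        simp; omega)]
  simp

theorem pvDropLoop_nonpos (k : Int) (l : List (List (String × String))) (h : k ≤ 0) :
    pvDropLoop k l = l := by
  induction l with
  | nil => rfl
  | cons m r ih =>
    unfold pvDropLoop
    rw [if_neg (by simp; omega), ih]

theorem pvOut_nil_drop (l : List (List (String × String))) : pvOut l [] = l := by
  unfold pvOut
  have : (fun p : Int × List (String × String) => !PySem.Set.contains (PySem.Set.ofList ([] : List Int)) p.1) = fun _ => true := by
    funext p; rw [pvContainsOfList]; simp
  rw [this, List.filter_true, PySem.List.map_snd_enumerate]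

theorem pvOut_cons_shift (m : List (String × String)) (r : List (List (String × String)))
    (D : List Int) (hD : (-1 : Int) ∉ D) :
    pvOut (m :: r) (D.map (· + 1)) = m :: pvOut r D := by
  unfold pvOut
  rw [PySem.List.enumerate_cons]
  simp only [List.filter_cons]
  have h0 : (0 : Int) ∉ D.map (· + 1) := by
    intro h
    obtain ⟨d, hd, hd1⟩ := List.mem_map.1 h
    have : d = -1 := by omega
    exact hD (this ▸ hd)
  rw [if_pos (by rw [pvContainsOfList]; simp [h0])]
  rw [zero_add, pvEnumShift, List.filter_map]
  simp only [Function.comp_def]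
  rw [List.filter_congr
      (p := fun p : Int × List (String × String) => !PySem.Set.contains (PySem.Set.ofList (D.map (· + 1))) (p.1 + 1))
      (q := fun p : Int × List (String × String) => !PySem.Set.contains (PySem.Set.ofList D) p.1)
      (fun p _ => by
        simp only [pvContainsOfList]
        congr 1
        simp only [decide_eq_decide, List.mem_map]
        constructor
        · rintro ⟨d, hd, he⟩; have : d = p.1 := by omega
          exact this ▸ hd
        · intro h; exact ⟨p.1, h, rfl⟩)]
  simp [List.map_map, Function.comp_def]

theorem pvOut_cons_drop (m : List (String × String)) (r : List (List (String × String)))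
    (T : List Int) :
    pvOut (m :: r) (0 :: T.map (· + 1)) = pvOut r T := by
  unfold pvOut
  rw [PySem.List.enumerate_cons]
  simp only [List.filter_cons]
  rw [if_neg (by rw [pvContainsOfList]; simp)]
  rw [zero_add, pvEnumShift, List.filter_map]
  simp only [Function.comp_def]
  rw [List.filter_congr
      (p := fun p : Int × List (String × String) => !PySem.Set.contains (PySem.Set.ofList (0 :: T.map (· + 1))) (p.1 + 1))
      (q := fun p : Int × List (String × String) => !PySem.Set.contains (PySem.Set.ofList T) p.1)
      (fun p hp => by
        have hnn := pvEnumNonneg r p hp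
        simp only [pvContainsOfList]
        congr 1
        simp only [decide_eq_decide, List.mem_cons, List.mem_map]
        constructor
        · rintro (h0 | ⟨d, hd, he⟩)
          · omega
          · have : d = p.1 := by omega
            exact this ▸ hd
        · intro h; exact Or.inr ⟨p.1, h, rfl⟩)]
  simp [List.map_map, Function.comp_def]

-- B's suffix stage equals the countdown drop.
theorem pvG (r : List (List (String × String))) :
    ∀ num : Int, pvOut r (pvTK num (pvSysL r)) = pvDropLoop num r := by
  induction r with
  | nil =>
    intro num
    rfl
  | cons m r ih =>
    intro num
    by_cases hs : (pvRole m == "system") = true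
    · by_cases hn : 0 < num
      · rw [pvSysL_cons_sys m r hs, pvTK_cons_pos num 0 _ hn, pvTK_map, pvOut_cons_drop, ih (num - 1)]
        simp only [pvDropLoop]
        rw [if_pos (by simp [hs]; omega)]
      · rw [pvSysL_cons_sys m r hs, pvTK_nonpos _ _ (by omega), pvOut_nil_drop,
           pvDropLoop_nonpos num (m :: r) (by omega)]
    · rw [pvSysL_cons_not m r (by simpa using hs), pvTK_map, pvOut_cons_shift, ih num]
      · simp only [pvDropLoop]
        rw [if_neg (by simp_all)]
      · intro hmem
        have := pvSysL_nonneg r _ (pvTK_mem num _ _ hmem)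
        omega

-- B equals the split-and-countdown form.
theorem pvAltSplit (l : List (List (String × String))) (num : Int) :
    remove_system_messages_alt l num = pvSplit l num := by
  induction l with
  | nil => rfl
  | cons m r ih =>
    rw [pvAlt_eq]
    by_cases hs : (pvRole m == "system") = true
    · rw [pvSysL_cons_sys m r hs, pvDL_cons_zero, pvTK_map, pvOut_cons_shift, pvG r num]
      · unfold pvSplit
        rw [List.findIdx?_cons, if_pos hs]
        simp
      · intro hmem
        have := pvSysL_nonneg r _ (pvTK_mem num _ _ hmem)
        omega
    · rw [pvSysL_cons_not m r (by simpa using hs), pvDL_map, pvOut_cons_shift, ← pvAlt_eq, ih]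
      · unfold pvSplit
        rw [List.findIdx?_cons, if_neg (by simp_all)]
        cases hfi : r.findIdx? (fun m => pvRole m == "system") with
        | none => simp
        | some i => simp [List.take_succ_cons, List.drop_succ_cons]
      · intro hmem
        have := pvSysL_nonneg r _ (pvDL_mem num _ _ hmem)
        omega

-- A-side: after the first system message is skipped, A's loop with counter cnt drops like the countdown with k = num - cnt.
theorem pvGoA_true (num : Int) (l : List (List (String × String))) :
    ∀ (cnt : Int) (acc : List (List (String × String))),
      pvGoA num l cnt true acc = acc ++ pvDropLoop (num - cnt) l := by
  induction l with
  | nil => intro cnt acc; simp [pvGoA, pvDropLoop]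
  | cons m rest ih =>
    intro cnt acc
    by_cases hs : pvRole m == "system"
    · by_cases hc : cnt < num
      · have hk : num - cnt > 0 := by omega
        have he : num - (cnt + 1) = num - cnt - 1 := by omega
        simp only [pvGoA, pvDropLoop, hs, hc, if_pos, Bool.not_true,
          decide_true, Bool.true_and, hk]
        rw [if_neg (by simp), ih, he]
      · have hk : ¬ (num - cnt > 0) := by omega
        simp only [pvGoA, pvDropLoop, hs, hc, Bool.not_true, ite_false, ite_true,
          hk, decide_false, Bool.false_and, Bool.false_eq_true]
        rw [ih]
        simp
    · simp only [pvGoA, pvDropLoop, hs, Bool.and_eq_true]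
      rw [if_neg (by simp_all), if_neg (by simp_all)]
      rw [ih]
      simp

theorem pvGoA_false (num : Int) (l : List (List (String × String))) :
    ∀ (acc : List (List (String × String))),
      pvGoA num l 0 false acc = acc ++ pvSplit l num := by
  induction l with
  | nil =>
    intro acc
    have h0 : ([] : List (List (String × String))).findIdx? (fun m => pvRole m == "system") = none := rfl
    simp [pvGoA, pvSplit, h0]
  | cons m rest ih =>
    intro acc
    by_cases hs : pvRole m == "system"
    · simp only [pvGoA, hs, Bool.not_false, if_true]
      rw [pvGoA_true]
      simp only [pvSplit, List.findIdx?_cons, hs, if_true]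
      simp
    · simp only [pvGoA, hs]
      rw [if_neg (by simp_all)]
      rw [ih]
      simp only [pvSplit, List.findIdx?_cons, hs]
      rw [if_neg (by simp_all)]
      cases hfi : rest.findIdx? (fun m => pvRole m == "system") with
      | none => simp
      | some i => simp [List.take_succ_cons, List.drop_succ_cons]

-- ===== VERDICT (by name: the statement is the Claim_ definition above) =====
theorem remove_system_messages_spec : Claim_equal_remove_system_messages := by
  intro context num _ _
  unfold Spec_remove_system_messages remove_system_messages
  rw [pvGoA_false, pvAltSplit]
  simp
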